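-- pv_equiv track=rewrite | github.com/HormyAJP/advent_of_code_2024 | 15.py | move_object_right
-- ===== SOURCE A (Python) =====
-- def move_object_right(grid, object, test_only=False):
--     object_type = grid[object[1]][object[0]]
--     assert(object_type in ["@", "O", "[", "]"])
--     if grid[object[1]][object[0]+1] == ".":
--         if not test_only:
--             grid[object[1]][object[0]+1] = object_type
--             grid[object[1]][object[0]] = "."
--         return True
--     elif grid[object[1]][object[0]+1] == "#":
--         return False
--     elif grid[object[1]][object[0]+1] in ["O", "[", "]"]:
--         if move_object_right(grid, (object[0]+1, object[1]), test_only):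
--             if not test_only:
--                 assert(grid[object[1]][object[0]+1] == ".")
--                 grid[object[1]][object[0]+1] = object_type
--                 grid[object[1]][object[0]] = "."
--             return True
--         return False
--     assert(False)
-- ===== SOURCE B (Python) =====
-- def move_object_right(grid, object, test_only=False):
--     x, y = object
--     row = grid[y]
--     assert row[x] in ("@", "O", "[", "]")
--     tail = row[x + 1:]
--     k = len(tail)
--     for i, c in enumerate(tail):
--         if c not in ("O", "[", "]"):
--             k = i
--             break
--     if k == len(tail) or tail[k] != ".":
--         return False
--     if not test_only:
--         row[x:x + 2 + k] = ["."] + [row[x]] + tail[:k]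
--     return True
-- ===== Notes on version B (the rewrite author's own statement) =====
-- stated objective: alternative
-- what changed: Replaces A's cell-by-cell recursion with a slice-based scan: take the row suffix after the object once, measure its leading box prefix, test the single cell after it, and do the shift as one slice assignment.
-- intended difference: On pushes whose scan starts at a negative column index and whose row suffix is all boxes, Python's negative indexing makes A wrap around and keep scanning from the row's left edge, returning True when that wrapped scan reaches '.'; B returns False (the chain has no room before the row's right edge), which is the intended grid semantics. — e.g. on move_object_right([[".", "@", "O", "O"]], (-3, 0), false): A returns true, B returns false
import Mathlib
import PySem

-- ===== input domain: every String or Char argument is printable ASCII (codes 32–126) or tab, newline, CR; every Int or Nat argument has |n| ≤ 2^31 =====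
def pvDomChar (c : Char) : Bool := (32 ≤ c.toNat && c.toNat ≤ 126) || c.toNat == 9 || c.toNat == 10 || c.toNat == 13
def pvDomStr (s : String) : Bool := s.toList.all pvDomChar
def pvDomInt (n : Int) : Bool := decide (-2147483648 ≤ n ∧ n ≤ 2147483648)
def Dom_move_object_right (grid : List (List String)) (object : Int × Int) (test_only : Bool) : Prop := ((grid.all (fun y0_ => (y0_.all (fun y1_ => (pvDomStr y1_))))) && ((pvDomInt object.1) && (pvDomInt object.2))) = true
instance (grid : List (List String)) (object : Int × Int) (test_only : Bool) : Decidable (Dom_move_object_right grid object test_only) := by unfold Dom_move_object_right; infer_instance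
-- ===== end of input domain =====

-- B replaces A's index-by-index recursion with a slice-based scan (box-prefix of the row suffix,
-- one slice-assignment shift); in Python both mutate the grid identically on nonnegative
-- coordinates, and the equivalence proved here is about the RETURN value only.

-- ===== PORT A =====
-- recursive push from A; the Nat argument is a fuel/totality guard only (2*len+2 exceeds the
-- longest possible chain of successful index accesses): on every input admitted by Pre_ it
-- follows A's recursion step for step.
def morAgo (row : List String) (x : Int) : Nat → Bool
  | 0 => false
  | n + 1 =>
    match PySem.List.pyGet? row (x + 1) with
    | none => false                                   -- IndexError in Python (outside Pre_)
    | some c =>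
      if c = "." then true
      else if c = "#" then false
      else if c ∈ (["O", "[", "]"] : List String) then morAgo row (x + 1) n
      else false                                      -- assert(False) in Python (outside Pre_)

def move_object_right (grid : List (List String)) (object : Int × Int) (test_only : Bool) : Bool :=
  match PySem.List.pyGet? grid object.2 with
  | none => false                                     -- IndexError (outside Pre_)
  | some row =>
    match PySem.List.pyGet? row object.1 with
    | none => false                                   -- IndexError (outside Pre_)
    | some t =>
      if t ∈ (["@", "O", "[", "]"] : List String) then morAgo row object.1 (2 * row.length + 2)
      else false                                      -- assert failure (outside Pre_)

-- ===== PORT B =====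
-- B's for-loop over the suffix computes the length of its leading run of box cells; ported as
-- structural recursion over that list (no index arithmetic, no fuel).
def boxPrefixLen : List String → Nat
  | [] => 0
  | c :: rest => if c = "O" ∨ c = "[" ∨ c = "]" then boxPrefixLen rest + 1 else 0

def move_object_right_alt (grid : List (List String)) (object : Int × Int) (test_only : Bool) : Bool :=
  match PySem.List.pyGet? grid object.2 with
  | none => false                                     -- IndexError (outside Pre_)
  | some row =>
    match PySem.List.pyGet? row object.1 with
    | none => false                                   -- IndexError (outside Pre_)
    | some t =>
      if t = "@" ∨ t = "O" ∨ t = "[" ∨ t = "]" then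
        let tail := PySem.List.slice row (some (object.1 + 1)) none   -- row[x+1:]
        let k := boxPrefixLen tail
        if k = tail.length ∨ PySem.List.pyGet? tail (k : Int) ≠ some "." then false
        else true                                     -- (the slice-assignment shift mutates only)
      else false                                      -- assert failure (outside Pre_)

-- ===== PRECONDITION & SPEC =====
-- Pre_: exactly the inputs on which Python A returns normally — row and start cell exist, the
-- start cell is an object character, and the rightward chain of boxes ends (inside the row, with
-- Python's negative-index convention) at "." or "#" before running off the row.
def Pre_move_object_right (grid : List (List String)) (object : Int × Int) (test_only : Bool) : Prop :=
  (PySem.List.pyGet? grid object.2).isSome = true ∧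
  (PySem.List.pyGet? ((PySem.List.pyGet? grid object.2).getD []) object.1
      ∈ ([some "@", some "O", some "[", some "]"] : List (Option String))) ∧
  ∃ j ∈ List.range (2 * ((PySem.List.pyGet? grid object.2).getD []).length + 2),
    (PySem.List.pyGet? ((PySem.List.pyGet? grid object.2).getD []) (object.1 + 1 + (j : Int))
        ∈ ([some ".", some "#"] : List (Option String))) ∧
    ∀ k ∈ List.range j,
      PySem.List.pyGet? ((PySem.List.pyGet? grid object.2).getD []) (object.1 + 1 + (k : Int))
        ∈ ([some "O", some "[", some "]"] : List (Option String))
instance (grid : List (List String)) (object : Int × Int) (test_only : Bool) : Decidable (Pre_move_object_right grid object test_only) := by unfold Pre_move_object_right; infer_instance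

def pvWitness_move_object_right : List (List String) × (Int × Int) × Bool :=
  ([["@", "O", ".", "#"]], (0, 0), false)

-- On pushes whose scan starts at a negative column index and whose row suffix is all boxes,
-- Python's negative indexing makes A wrap around and keep scanning from the row's left edge,
-- returning True when that wrapped scan reaches "."; B returns False (the chain has no room
-- before the row's right edge), which is the intended grid semantics.
def pvRow (grid : List (List String)) (y : Int) : List String :=
  (PySem.List.pyGet? grid y).getD []

def pvBox (c : String) : Bool := c == "O" || c == "[" || c == "]"

def D_move_object_right (grid : List (List String)) (object : Int × Int) (test_only : Bool) : Prop :=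
  let r := pvRow grid object.2
  object.1 + 1 < 0 ∧
  (-(object.1 + 1)).toNat ≤ (r.reverse.takeWhile pvBox).length ∧
  (r.dropWhile pvBox).head? = some "."
instance (grid : List (List String)) (object : Int × Int) (test_only : Bool) : Decidable (D_move_object_right grid object test_only) := by unfold D_move_object_right; infer_instance

def Spec_move_object_right (grid : List (List String)) (object : Int × Int) (test_only : Bool) (out : Bool) : Prop := ¬ D_move_object_right grid object test_only → out = move_object_right_alt grid object test_only
instance (grid : List (List String)) (object : Int × Int) (test_only : Bool) (out : Bool) : Decidable (Spec_move_object_right grid object test_only out) := by unfold Spec_move_object_right; infer_instance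

def pvDiffWitness_move_object_right : List (List String) × (Int × Int) × Bool :=
  ([[".", "@", "O", "O"]], (-3, 0), false)

def pvDiffWitnessOut_move_object_right : Bool × Bool := (true, false)

-- ===== CLAIM =====
def Claim_unchanged_move_object_right : Prop := ∀ (grid : List (List String)) (object : Int × Int) (test_only : Bool), Dom_move_object_right grid object test_only → Pre_move_object_right grid object test_only → Spec_move_object_right grid object test_only (move_object_right grid object test_only)
def Claim_changed_move_object_right : Prop := Dom_move_object_right (pvDiffWitness_move_object_right.1) (pvDiffWitness_move_object_right.2.1) (pvDiffWitness_move_object_right.2.2) ∧ Pre_move_object_right (pvDiffWitness_move_object_right.1) (pvDiffWitness_move_object_right.2.1) (pvDiffWitness_move_object_right.2.2) ∧ D_move_object_right (pvDiffWitness_move_object_right.1) (pvDiffWitness_move_object_right.2.1) (pvDiffWitness_move_object_right.2.2) ∧ move_object_right (pvDiffWitness_move_object_right.1) (pvDiffWitness_move_object_right.2.1) (pvDiffWitness_move_object_right.2.2) = pvDiffWitnessOut_move_object_right.1 ∧ move_object_right_alt (pvDiffWitness_move_object_right.1) (pvDiffWitness_move_object_right.2.1) (pvDiffWitness_move_object_right.2.2)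 = pvDiffWitnessOut_move_object_right.2 ∧ pvDiffWitnessOut_move_object_right.1 ≠ pvDiffWitnessOut_move_object_right.2
def Claim_exact_move_object_right : Prop := ∀ (grid : List (List String)) (object : Int × Int) (test_only : Bool), Dom_move_object_right grid object test_only → Pre_move_object_right grid object test_only → D_move_object_right grid object test_only → move_object_right grid object test_only ≠ move_object_right_alt grid object test_only

-- ===== LEMMAS AND PROOFS =====

-- A's recursion returns (c = ".") where c is the chain's terminator (offset j after x+1).
theorem morAgo_char (row : List String) :
    ∀ (j : Nat) (x : Int) (n : Nat) (c : String),
      PySem.List.pyGet? row (x + 1 + (j : Int)) = some c → (c = "." ∨ c = "#") →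
      (∀ k < j, ∃ b, PySem.List.pyGet? row (x + 1 + (k : Int)) = some b ∧
        (b = "O" ∨ b = "[" ∨ b = "]")) →
      j < n → morAgo row x n = decide (c = ".") := by
  intro j
  induction j with
  | zero =>
      intro x n c hterm hc _ hn
      obtain ⟨n', rfl⟩ : ∃ n', n = n' + 1 := ⟨n - 1, by omega⟩
      have hget : PySem.List.pyGet? row (x + 1) = some c := by
        simpa using hterm
      rcases hc with rfl | rfl <;> simp [morAgo, hget]
  | succ j ih =>
      intro x n c hterm hc hbox hn
      obtain ⟨n', rfl⟩ : ∃ n', n = n' + 1 := ⟨n - 1, by omega⟩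
      obtain ⟨b, hb, hbval⟩ := hbox 0 (by omega)
      have hget : PySem.List.pyGet? row (x + 1) = some b := by simpa using hb
      have hdot : ¬ b = "." := by rcases hbval with rfl | rfl | rfl <;> simp
      have hhash : ¬ b = "#" := by rcases hbval with rfl | rfl | rfl <;> simp
      have hrec : morAgo row (x + 1) n' = decide (c = ".") := by
        refine ih (x + 1) n' c ?_ hc ?_ (by omega)
        · have : x + 1 + 1 + (j : Int) = x + 1 + ((j + 1 : Nat) : Int) := by push_cast; ring
          rw [this]; exact hterm
        · intro k hk
          obtain ⟨b', hb', hv'⟩ := hbox (k + 1) (by omega)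
          refine ⟨b', ?_, hv'⟩
          have : x + 1 + 1 + (k : Int) = x + 1 + ((k + 1 : Nat) : Int) := by push_cast; ring
          rw [this]; exact hb'
      simp [morAgo, hget, hdot, hhash, hbval, hrec]

-- B's prefix counter returns exactly the terminator's offset.
theorem boxPrefixLen_char :
    ∀ (j : Nat) (tail : List String) (c : String),
      tail[j]? = some c → ¬ (c = "O" ∨ c = "[" ∨ c = "]") →
      (∀ k < j, ∃ b, tail[k]? = some b ∧ (b = "O" ∨ b = "[" ∨ b = "]")) →
      boxPrefixLen tail = j := by
  intro j
  induction j with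
  | zero =>
      intro tail c hterm hc _
      cases tail with
      | nil => simp at hterm
      | cons a rest =>
          simp at hterm; subst hterm
          simp [boxPrefixLen, hc]
  | succ j ih =>
      intro tail c hterm hc hbox
      cases tail with
      | nil => simp at hterm
      | cons a rest =>
          obtain ⟨b, hb, hv⟩ := hbox 0 (by omega)
          simp at hb; subst hb
          have : boxPrefixLen rest = j :=
            ih rest c (by simpa using hterm) hc (fun k hk => by
              obtain ⟨b', hb', hv'⟩ := hbox (k + 1) (by omega)
              exact ⟨b', by simpa using hb', hv'⟩)
          simp [boxPrefixLen, hv, this]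

-- when the whole suffix is boxes the counter exhausts it
theorem boxPrefixLen_all :
    ∀ (tail : List String), (∀ b ∈ tail, b = "O" ∨ b = "[" ∨ b = "]") →
      boxPrefixLen tail = tail.length := by
  intro tail
  induction tail with
  | nil => intro _; simp [boxPrefixLen]
  | cons a rest ih =>
      intro h
      have ha := h a (by simp)
      simp [boxPrefixLen, ha, ih (fun b hb => h b (by simp [hb]))]

-- B's body (after the matches) applied to a row and start column x
def altBody (row : List String) (x : Int) : Bool :=
  let tail := PySem.List.slice row (some (x + 1)) none
  let k := boxPrefixLen tail
  if k = tail.length ∨ PySem.List.pyGet? tail (k : Int) ≠ some "." then false else true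

-- the two bodies agree when the chain's terminator sits before any wraparound (offset j < m)
theorem bodies_eq_of_tail (row : List String) (x : Int) (j : Nat) (c : String) (p : Nat)
    (hterm : PySem.List.pyGet? row (x + 1 + (j : Int)) = some c) (hc : c = "." ∨ c = "#")
    (hbox : ∀ k < j, ∃ b, PySem.List.pyGet? row (x + 1 + (k : Int)) = some b ∧
      (b = "O" ∨ b = "[" ∨ b = "]"))
    (hfuel : j < 2 * row.length + 2)
    (hsl : PySem.List.slice row (some (x + 1)) none = row.drop p)
    (hacc : ∀ k ≤ j, PySem.List.pyGet? row (x + 1 + (k : Int)) = (row.drop p)[k]?) :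
    morAgo row x (2 * row.length + 2) = altBody row x := by
  have hA := morAgo_char row j x (2 * row.length + 2) c hterm hc hbox hfuel
  have htail : (row.drop p)[j]? = some c := by rw [← hacc j le_rfl]; exact hterm
  have hcnb : ¬ (c = "O" ∨ c = "[" ∨ c = "]") := by
    rcases hc with rfl | rfl <;> simp
  have hk : boxPrefixLen (row.drop p) = j := by
    refine boxPrefixLen_char j (row.drop p) c htail hcnb ?_
    intro k hkj
    obtain ⟨b, hb, hv⟩ := hbox k hkj
    exact ⟨b, by rw [← hacc k (le_of_lt hkj)]; exact hb, hv⟩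
  have hjlt : j < (row.drop p).length := by
    by_contra h
    rw [List.getElem?_eq_none (by omega)] at htail
    simp at htail
  have hgetk : PySem.List.pyGet? (row.drop p) ((j : Nat) : Int) = some c := by
    rw [PySem.List.pyGet?_natCast _ _]; exact htail
  unfold altBody
  simp only [hsl, hk, hgetk]
  have hne2 : ¬ j = row.length - p := by
    have := hjlt
    simp only [List.length_drop] at this
    omega
  rcases hc with rfl | rfl <;> simp [hA, hne2]

-- pvBox as a proposition
theorem pvBox_iff (b : String) : pvBox b = true ↔ (b = "O" ∨ b = "[" ∨ b = "]") := by
  simp [pvBox]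
  tauto

-- enough box cells at the front keep takeWhile going that far
theorem le_length_takeWhile :
    ∀ (m : Nat) (l : List String), (∀ i < m, ∃ b, l[i]? = some b ∧ pvBox b = true) →
      m ≤ (l.takeWhile pvBox).length := by
  intro m
  induction m with
  | zero => intro l _; omega
  | succ m ih =>
      intro l hbox
      obtain ⟨b, hb, hpb⟩ := hbox 0 (by omega)
      cases l with
      | nil => simp at hb
      | cons a rest =>
          simp at hb
          subst hb
          rw [List.takeWhile_cons_of_pos hpb]
          have := ih rest (fun i hi => by
            obtain ⟨b', hb', hpb'⟩ := hbox (i + 1) (by omega)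
            exact ⟨b', by simpa using hb', hpb'⟩)
          simp
          omega

-- and every cell takeWhile keeps is a box
theorem takeWhile_getElem? :
    ∀ (l : List String) (i : Nat), i < (l.takeWhile pvBox).length →
      ∃ b, l[i]? = some b ∧ pvBox b = true := by
  intro l
  induction l with
  | nil => intro i hi; simp [List.takeWhile] at hi
  | cons a rest ih =>
      intro i hi
      by_cases hpa : pvBox a = true
      · rw [List.takeWhile_cons_of_pos hpa] at hi
        cases i with
        | zero => exact ⟨a, by simp, hpa⟩
        | succ i =>
            obtain ⟨b, hb, hpb⟩ := ih i (by simpa using hi)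
            exact ⟨b, by simpa using hb, hpb⟩
      · rw [List.takeWhile_cons_of_neg (by simpa using hpa)] at hi
        simp at hi

-- a box prefix followed by "." makes dropWhile expose the "."
theorem dropWhile_head_of :
    ∀ (j : Nat) (l : List String), (∀ k < j, ∃ b, l[k]? = some b ∧ pvBox b = true) →
      l[j]? = some "." → (l.dropWhile pvBox).head? = some "." := by
  intro j
  induction j with
  | zero =>
      intro l _ hdot
      cases l with
      | nil => simp at hdot
      | cons a rest =>
          simp at hdot
          subst hdot
          simp [List.dropWhile, pvBox]
  | succ j ih =>
      intro l hbox hdot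
      cases l with
      | nil => simp at hdot
      | cons a rest =>
          obtain ⟨b, hb, hpb⟩ := hbox 0 (by omega)
          simp at hb
          subst hb
          rw [List.dropWhile_cons_of_pos hpb]
          refine ih rest ?_ (by simpa using hdot)
          intro k hk
          obtain ⟨b', hb', hpb'⟩ := hbox (k + 1) (by omega)
          exact ⟨b', by simpa using hb', hpb'⟩

-- and conversely: dropWhile exposing "." yields the box prefix
theorem head_dropWhile_inv :
    ∀ (l : List String), (l.dropWhile pvBox).head? = some "." →
      ∃ j : Nat, l[j]? = some "." ∧ ∀ k < j, ∃ b, l[k]? = some b ∧ pvBox b = true := by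
  intro l
  induction l with
  | nil => intro h; simp [List.dropWhile] at h
  | cons a rest ih =>
      intro h
      by_cases hpa : pvBox a = true
      · rw [List.dropWhile_cons_of_pos hpa] at h
        obtain ⟨j, hdot, hbox⟩ := ih h
        refine ⟨j + 1, by simpa using hdot, ?_⟩
        intro k hk
        cases k with
        | zero => exact ⟨a, by simp, hpa⟩
        | succ k =>
            obtain ⟨b, hb, hpb⟩ := hbox k (by omega)
            exact ⟨b, by simpa using hb, hpb⟩
      · rw [List.dropWhile_cons_of_neg (by simpa using hpa)] at h
        simp at h
        subst h
        exact ⟨0, by simp, by omega⟩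

-- ===== VERDICT =====
theorem move_object_right_spec : Claim_unchanged_move_object_right := by
  intro grid object test_only _ hpre hnd
  obtain ⟨hys, ht, j, hjr, hterm, hbox⟩ := hpre
  obtain ⟨row, hrowe⟩ := Option.isSome_iff_exists.mp hys
  rw [hrowe] at ht hterm hbox hjr
  simp only [Option.getD_some] at ht hterm hbox hjr
  simp only [List.mem_range] at hjr
  simp only [List.mem_cons, List.not_mem_nil, or_false] at ht hterm
  have hbox' : ∀ k < j, ∃ b, PySem.List.pyGet? row (object.1 + 1 + (k : Int)) = some b ∧
      (b = "O" ∨ b = "[" ∨ b = "]") := by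
    intro k hk
    have := hbox k (List.mem_range.mpr hk)
    simp only [List.mem_cons, List.not_mem_nil, or_false] at this
    rcases this with h | h | h
    · exact ⟨"O", h, by simp⟩
    · exact ⟨"[", h, by simp⟩
    · exact ⟨"]", h, by simp⟩
  obtain ⟨c, htermc, hcval⟩ : ∃ c, PySem.List.pyGet? row (object.1 + 1 + (j : Int)) = some c ∧
      (c = "." ∨ c = "#") := by
    rcases hterm with h | h
    · exact ⟨".", h, Or.inl rfl⟩
    · exact ⟨"#", h, Or.inr rfl⟩
  have hBody : morAgo row object.1 (2 * row.length + 2) = altBody row object.1 := by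
    by_cases hs : 0 ≤ object.1 + 1
    · -- scan starts at a nonnegative index: no wraparound possible
      refine bodies_eq_of_tail row object.1 j c ((object.1 + 1).toNat) htermc hcval hbox' hjr ?_ ?_
      · rw [PySem.List.slice_from row hs]
      · intro k hk
        rw [PySem.List.pyGet?_of_nonneg row (by omega), List.getElem?_drop]
        congr 1
        omega
    · push_neg at hs
      have hb0 : ∃ b0, PySem.List.pyGet? row (object.1 + 1 + ((0 : Nat) : Int)) = some b0 := by
        rcases Nat.eq_zero_or_pos j with rfl | hj
        · exact ⟨c, htermc⟩
        · obtain ⟨b, hb, _⟩ := hbox' 0 hj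
          exact ⟨b, hb⟩
      obtain ⟨b0, hb0⟩ := hb0
      have hin : PySem.Raise.InRange row.length (object.1 + 1) := by
        by_contra hni
        have hnone := (PySem.List.pyGet?_eq_none_iff row (object.1 + 1)).mpr hni
        simp only [Nat.cast_zero, add_zero] at hb0
        rw [hnone] at hb0
        simp at hb0
      have hinlo : -(row.length : Int) ≤ object.1 + 1 := by
        simp [PySem.Raise.InRange] at hin; omega
      set m : Nat := (-(object.1 + 1)).toNat with hmdef
      have hm0 : 0 < m := by omega
      have hmlen : m ≤ row.length := by omega
      have hxm : object.1 + 1 = -((m : Nat) : Int) := by omega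
      by_cases hcross : j < m
      · -- the chain ends before reaching the wrap
        refine bodies_eq_of_tail row object.1 j c (row.length - m) htermc hcval hbox' hjr ?_ ?_
        · rw [hxm, PySem.List.slice_from_neg_natCast row m hm0]
        · intro k hk
          have hkm : k < m := by omega
          have hcast : object.1 + 1 + (k : Int) = -(((m - k : Nat)) : Int) := by omega
          rw [hcast, PySem.List.pyGet?_neg_natCast row (m - k) (by omega) (by omega), List.getElem?_drop]
          congr 1
          omega
      · -- the chain would cross the wrap: the whole suffix is boxes
        push_neg at hcross
        have hsufget : ∀ k < m, ∃ b, row[row.length - m + k]? = some b ∧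
            (b = "O" ∨ b = "[" ∨ b = "]") := by
          intro k hk
          obtain ⟨b, hb, hv⟩ := hbox' k (by omega)
          have hcast : object.1 + 1 + (k : Int) = -(((m - k : Nat)) : Int) := by omega
          rw [hcast, PySem.List.pyGet?_neg_natCast row (m - k) (by omega) (by omega)] at hb
          refine ⟨b, ?_, hv⟩
          rw [← hb]
          congr 1
          omega
        have htail_all : ∀ b ∈ row.drop (row.length - m), b = "O" ∨ b = "[" ∨ b = "]" := by
          intro b hb
          obtain ⟨i, hgi⟩ := List.mem_iff_getElem?.mp hb
          have hilen : i < (row.drop (row.length - m)).length := by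
            by_contra hni
            rw [List.getElem?_eq_none (by omega)] at hgi
            simp at hgi
          have him : i < m := by
            have := hilen
            simp only [List.length_drop] at this
            omega
          obtain ⟨b', hb', hv'⟩ := hsufget i him
          rw [List.getElem?_drop, hb'] at hgi
          cases hgi
          exact hv'
        have hBfalse : altBody row object.1 = false := by
          unfold altBody
          rw [hxm, PySem.List.slice_from_neg_natCast row m hm0]
          simp [boxPrefixLen_all _ htail_all]
        have hchash : c = "#" := by
          rcases hcval with hdot | h
          swap
          · exact h
          exfalso
          apply hnd
          unfold D_move_object_right
          simp only [pvRow, hrowe, Option.getD_some]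
          refine ⟨hs, ?_, ?_⟩
          · rw [← hmdef]
            refine le_length_takeWhile m row.reverse ?_
            intro i hi
            obtain ⟨b, hb, hv⟩ := hsufget (m - 1 - i) (by omega)
            refine ⟨b, ?_, (pvBox_iff b).mpr hv⟩
            rw [List.getElem?_reverse (by omega), ← hb]
            congr 1
            omega
          · -- the wrapped scan from the row's left edge reaches "."
            have hcast : object.1 + 1 + (j : Int) = (((j - m : Nat)) : Int) := by omega
            rw [hcast, PySem.List.pyGet?_natCast _ _, hdot] at htermc
            refine dropWhile_head_of (j - m) row ?_ htermc
            intro k hk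
            obtain ⟨b, hb, hv⟩ := hbox' (m + k) (by omega)
            have hcast2 : object.1 + 1 + ((m + k : Nat) : Int) = ((k : Nat) : Int) := by omega
            rw [hcast2, PySem.List.pyGet?_natCast _ _] at hb
            exact ⟨b, hb, (pvBox_iff b).mpr hv⟩
        have hA := morAgo_char row j object.1 (2 * row.length + 2) c htermc hcval hbox' hjr
        rw [hBfalse, hA, hchash]
        simp
  unfold move_object_right move_object_right_alt
  rcases ht with h | h | h | h <;>
    simp only [hrowe, h, altBody] at hBody ⊢ <;>
      simpa using hBody

theorem move_object_right_changed : Claim_changed_move_object_right := by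
  unfold Claim_changed_move_object_right
  decide

theorem move_object_right_tight : Claim_exact_move_object_right := by
  intro grid object test_only _ hpre hd
  obtain ⟨hys, ht, _⟩ := hpre
  obtain ⟨hs, htw, hdw⟩ := hd
  obtain ⟨row, hrowe⟩ := Option.isSome_iff_exists.mp hys
  rw [hrowe] at ht
  simp only [pvRow, hrowe, Option.getD_some] at ht htw hdw
  simp only [List.mem_cons, List.not_mem_nil, or_false] at ht
  set m : Nat := (-(object.1 + 1)).toNat with hmdef
  have hm0 : 0 < m := by omega
  have hmlen : m ≤ row.length := by
    have h1 : (row.reverse.takeWhile pvBox).length ≤ row.reverse.length :=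
      (List.takeWhile_sublist pvBox).length_le
    simp only [List.length_reverse] at h1
    omega
  have hxm : object.1 + 1 = -((m : Nat) : Int) := by omega
  obtain ⟨j', hdotE, hprefE⟩ := head_dropWhile_inv row hdw
  have hj'r : j' < row.length := by
    by_contra hni
    rw [List.getElem?_eq_none (by omega)] at hdotE
    simp at hdotE
  have hsufget : ∀ k < m, ∃ b, row[row.length - m + k]? = some b ∧
      (b = "O" ∨ b = "[" ∨ b = "]") := by
    intro k hk
    obtain ⟨b, hb, hpb⟩ := takeWhile_getElem? row.reverse (m - 1 - k) (by omega)
    refine ⟨b, ?_, (pvBox_iff b).mp hpb⟩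
    rw [List.getElem?_reverse (by omega)] at hb
    rw [← hb]
    congr 1
    omega
  -- A scans the box suffix, wraps, scans the box prefix, and finds "." at offset m + j'
  have htermc : PySem.List.pyGet? row (object.1 + 1 + ((m + j' : Nat) : Int)) = some "." := by
    have hcast : object.1 + 1 + ((m + j' : Nat) : Int) = ((j' : Nat) : Int) := by omega
    rw [hcast, PySem.List.pyGet?_natCast _ _]
    exact hdotE
  have hbox' : ∀ k < m + j', ∃ b, PySem.List.pyGet? row (object.1 + 1 + (k : Int)) = some b ∧
      (b = "O" ∨ b = "[" ∨ b = "]") := by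
    intro k hk
    by_cases hkm : k < m
    · obtain ⟨b, hg, hv⟩ := hsufget k hkm
      refine ⟨b, ?_, hv⟩
      have hcast : object.1 + 1 + (k : Int) = -(((m - k : Nat)) : Int) := by omega
      rw [hcast, PySem.List.pyGet?_neg_natCast row (m - k) (by omega) (by omega)]
      rw [← hg]
      congr 1
      omega
    · have hk' : k - m < j' := by omega
      obtain ⟨b, hb, hpb⟩ := hprefE (k - m) hk'
      refine ⟨b, ?_, (pvBox_iff b).mp hpb⟩
      have hcast : object.1 + 1 + (k : Int) = (((k - m : Nat)) : Int) := by omega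
      rw [hcast, PySem.List.pyGet?_natCast _ _]
      exact hb
  have hA := morAgo_char row (m + j') object.1 (2 * row.length + 2) "." htermc (Or.inl rfl)
    hbox' (by omega)
  have htail_all : ∀ b ∈ row.drop (row.length - m), b = "O" ∨ b = "[" ∨ b = "]" := by
    intro b hb
    obtain ⟨i, hgi⟩ := List.mem_iff_getElem?.mp hb
    have hilen : i < (row.drop (row.length - m)).length := by
      by_contra hni
      rw [List.getElem?_eq_none (by omega)] at hgi
      simp at hgi
    have him : i < m := by
      have := hilen
      simp only [List.length_drop] at this
      omega
    obtain ⟨b', hb', hv'⟩ := hsufget i him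
    rw [List.getElem?_drop, hb'] at hgi
    cases hgi
    exact hv'
  have hslice : PySem.List.slice row (some (object.1 + 1)) none = row.drop (row.length - m) := by
    rw [hxm, PySem.List.slice_from_neg_natCast row m hm0]
  have hkall : boxPrefixLen (row.drop (row.length - m)) = (row.drop (row.length - m)).length :=
    boxPrefixLen_all _ htail_all
  have hAtrue : move_object_right grid object test_only = true := by
    unfold move_object_right
    rcases ht with h | h | h | h <;> simp [hrowe, h, hA]
  have hBf : move_object_right_alt grid object test_only = false := by
    unfold move_object_right_alt
    rcases ht with h | h | h | h <;> simp [hrowe, h, hslice, hkall]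
  rw [hAtrue, hBf]
  simp
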